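-- pv_equiv track=rewrite | github.com/MBS94/SumSquareProblem | QRSquareSum.py | QRAdjList
-- ===== SOURCE A (Python) =====
-- import time, random, math
--
-- def QRList(p):
--     QRList = []
--     for i in range(1, math.floor( (p-1)/2 ) + 1):
--         qr = (i ** 2) % p
--         if qr not in QRList:
--             QRList.append(qr)
--     QRList.sort()
--     return QRList
--
-- def QRAdjList(n, p):  # Creates the Adjacency Matrix for Squares
--     qrList = QRList(p)
--     adjDict = {}
--     for i in range(1, n + 1):
--         adjDict[i] = []
--     for i in range(1, n + 1):
--         for j in range(1, n + 1):
--             if ((i+j) % p) in qrList and i != j: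
--                 adjDict[i].append(j)
--     return adjDict
-- ===== SOURCE B (Python) =====
-- def QRAdjList(n, p):  # Creates the Adjacency Matrix for Squares
--     # Residue-driven generation: for each vertex i, walk each quadratic-residue
--     # class j = (r - i) mod p, +p, +2p, ... instead of testing every j.
--     qrs = sorted({(i * i) % p for i in range(1, (p - 1) // 2 + 1)})
--     adj = {}
--     for i in range(1, n + 1):
--         base = (-i) % p  # class of -i, hoisted out of the residue loop
--         row = []
--         for r in qrs:
--             start = (r + base) % p or p  # class 0 starts at p
--             row.extend(j for j in range(start, n + 1, p) if j != i)
--         row.sort()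
--         adj[i] = row
--     return adj
-- ===== Notes on version B (the rewrite author's own statement) =====
-- stated objective: faster
-- what changed: Instead of testing (i+j) % p against the residue list for all n^2 pairs, B precomputes the quadratic-residue set once and, for each vertex i, generates its neighbours directly by stepping through each residue class j = (r-i) % p, +p, +2p, ... up to n, then sorts the row.
import Mathlib
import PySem

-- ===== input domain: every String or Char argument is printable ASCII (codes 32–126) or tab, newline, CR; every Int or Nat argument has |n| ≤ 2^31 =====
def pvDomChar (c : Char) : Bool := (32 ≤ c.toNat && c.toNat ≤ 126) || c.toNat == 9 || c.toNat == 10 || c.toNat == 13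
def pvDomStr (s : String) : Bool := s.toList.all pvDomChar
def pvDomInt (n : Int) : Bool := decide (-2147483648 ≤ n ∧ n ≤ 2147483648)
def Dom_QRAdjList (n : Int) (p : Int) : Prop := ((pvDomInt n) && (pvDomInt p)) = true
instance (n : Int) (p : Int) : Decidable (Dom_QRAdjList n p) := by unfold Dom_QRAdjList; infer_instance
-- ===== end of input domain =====

-- B replaces A's all-pairs residue test by residue-driven generation: for each vertex it
-- walks each quadratic-residue class in steps of p and sorts the collected row.

-- ===== PORT A =====
-- A's helper QRList; math.floor((p-1)/2) on ints is exact floor division for |p| ≤ 2^31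
def QRList (p : Int) : List Int :=
  let l := (PySem.List.pyRange 1 (PySem.Int.floordiv (p-1) 2 + 1) 1).foldl
    (fun acc i =>
      let qr := PySem.Int.mod (i ^ 2) p
      if !(acc.contains qr) then acc ++ [qr] else acc) []
  PySem.List.sorted l (fun x => x)

def QRAdjList (n : Int) (p : Int) : List (Int × List Int) :=
  let qrList := QRList p
  let adjDict : PySem.Dict Int (List Int) :=
    (PySem.List.pyRange 1 (n+1) 1).foldl (fun d i => d.insert i []) PySem.Dict.empty
  let adjDict :=
    (PySem.List.pyRange 1 (n+1) 1).foldl (fun d i =>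
      (PySem.List.pyRange 1 (n+1) 1).foldl (fun d j =>
        if qrList.contains (PySem.Int.mod (i+j) p) && (i != j)
        then d.modify i [] (· ++ [j]) else d) d) adjDict
  adjDict.items

-- ===== PORT B =====
-- Python's 'x or p' on the int x = (r+base) % p is 'if x == 0 then p else x'
def QRAdjList_alt (n : Int) (p : Int) : List (Int × List Int) :=
  let qrs := PySem.List.sorted
    (PySem.Set.ofList ((PySem.List.pyRange 1 (PySem.Int.floordiv (p-1) 2 + 1) 1).map
      (fun i => PySem.Int.mod (i * i) p))) (fun x => x)
  let adj := (PySem.List.pyRange 1 (n+1) 1).foldl (fun d i =>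
      let base := PySem.Int.mod (-i) p
      let row := qrs.foldl (fun acc r =>
        let start := if PySem.Int.mod (r + base) p == 0 then p else PySem.Int.mod (r + base) p
        acc ++ (PySem.List.pyRange start (n+1) p).filter (fun j => j != i)) []
      d.insert i (PySem.List.sorted row (fun x => x))) PySem.Dict.empty
  adj.items

-- ===== PRECONDITION & SPEC =====
-- Pre_ excludes exactly the inputs where Python A raises ZeroDivisionError: p = 0 with n ≥ 1
-- (B raises there too).
def Pre_QRAdjList (n : Int) (p : Int) : Prop := p ≠ 0 ∨ n ≤ 0
instance (n : Int) (p : Int) : Decidable (Pre_QRAdjList n p) := by unfold Pre_QRAdjList; infer_instance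
def pvWitness_QRAdjList : Int × Int := (6, 5)

def Spec_QRAdjList (n : Int) (p : Int) (out : List (Int × List Int)) : Prop := out = QRAdjList_alt n p
instance (n : Int) (p : Int) (out : List (Int × List Int)) : Decidable (Spec_QRAdjList n p out) := by unfold Spec_QRAdjList; infer_instance

-- ===== CLAIM (what is proved, stated in full; the proofs are below) =====
def Claim_equal_QRAdjList : Prop := ∀ (n : Int) (p : Int), Dom_QRAdjList n p → Pre_QRAdjList n p → Spec_QRAdjList n p (QRAdjList n p)

-- ===== LEMMAS AND PROOFS =====

-- A's row for vertex i, in ascending order of j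
def rowA (n p i : Int) (Q : List Int) : List Int :=
  (PySem.List.pyRange 1 (n+1) 1).filter (fun j => Q.contains (PySem.Int.mod (i+j) p) && (i != j))

-- B's stepped progression for vertex i and residue r (normal form used by the proofs)
def progB (n p i r : Int) : List Int :=
  let j0 := PySem.Int.mod (r - i) p
  let start := if j0 ≥ 1 then j0 else j0 + p
  (PySem.List.pyRange start (n+1) p).filter (fun j => j != i)

theorem qrset_eq : ∀ p : Int,
    QRList p = PySem.List.sorted
      (PySem.Set.ofList ((PySem.List.pyRange 1 (PySem.Int.floordiv (p-1) 2 + 1) 1).map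
        (fun i => PySem.Int.mod (i * i) p))) (fun x => x) := by
  intro p
  have hf : (fun (acc : List Int) (i : Int) =>
      let qr := PySem.Int.mod (i ^ 2) p
      if !(acc.contains qr) then acc ++ [qr] else acc)
      = fun acc i => PySem.Set.add acc (PySem.Int.mod (i * i) p) := by
    funext acc i
    simp only [PySem.Set.add, PySem.Set.contains, ← pow_two]
    cases h : acc.contains (PySem.Int.mod (i^2) p) <;> simp_all
  unfold QRList
  rw [PySem.Set.ofList_eq_foldl, List.foldl_map, hf]

theorem qrlist_nil (p : Int) (hp : p ≤ 2) : QRList p = [] := by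
  have h : PySem.Int.floordiv (p-1) 2 + 1 ≤ 1 := by
    have := (PySem.Int.floordiv_lt_iff_lt_mul (a := p-1) (b := 2) (q := 1) (by omega)).mpr (by omega)
    omega
  unfold QRList
  rw [PySem.List.pyRange_one_eq_nil h]
  rfl

theorem qrlist_nodup (p : Int) : (QRList p).Nodup := by
  rw [qrset_eq]
  exact ((PySem.List.sorted_perm _ _ _).nodup_iff).mpr (PySem.Set.nodup_ofList _)

theorem qrlist_bounds (p : Int) (hp : 0 < p) (r : Int) (hr : r ∈ QRList p) :
    0 ≤ r ∧ r < p := by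
  rw [qrset_eq] at hr
  rw [PySem.List.mem_sorted, PySem.Set.mem_ofList, List.mem_map] at hr
  obtain ⟨i, _, rfl⟩ := hr
  exact ⟨PySem.Int.mod_nonneg _ hp, PySem.Int.mod_lt _ hp⟩

theorem mem_progB (n p i r j : Int) (hp : 0 < p) (h0 : 0 ≤ r) (h1 : r < p) :
    j ∈ progB n p i r ↔ 1 ≤ j ∧ j ≤ n ∧ j ≠ i ∧ PySem.Int.mod (i+j) p = r := by
  unfold progB
  simp only [PySem.Int.mod_eq_emod_of_pos hp]
  set j0 := (r - i) % p with hj0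
  have hb0 : 0 ≤ j0 := Int.emod_nonneg _ (by omega)
  have hb1 : j0 < p := Int.emod_lt_of_pos _ hp
  set s := (if j0 ≥ 1 then j0 else j0 + p) with hs
  have hs1 : 1 ≤ s ∧ s ≤ p := by rw [hs]; split <;> omega
  have hsm : s % p = j0 := by
    rw [hs]; split
    · exact Int.emod_eq_of_lt hb0 hb1
    · have h : j0 = 0 := by omega
      rw [h]; simp
  simp only [List.mem_filter, PySem.List.mem_pyRange_iff_of_pos hp, bne_iff_ne]
  constructor
  · rintro ⟨⟨hsj, hjn, hd⟩, hne⟩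
    refine ⟨by omega, by omega, hne, ?_⟩
    have hjs : j ≡ s [ZMOD p] := (Int.modEq_iff_dvd.mpr hd).symm
    have hsr : s ≡ r - i [ZMOD p] := by
      show s % p = (r - i) % p
      rw [hsm, hj0]
    have : i + j ≡ i + (r - i) [ZMOD p] := Int.ModEq.add_left i (hjs.trans hsr)
    have h2 : (i + j) % p = r % p := by simpa using this
    rw [h2, Int.emod_eq_of_lt h0 h1]
  · rintro ⟨h1j, hjn, hji, hmod⟩
    have hir : i + j ≡ r [ZMOD p] := by
      show (i + j) % p = r % p
      rw [hmod, Int.emod_eq_of_lt h0 h1]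
    have hjr : j ≡ r - i [ZMOD p] := by
      have := hir.sub (Int.ModEq.refl i)
      simpa [add_sub_cancel_left] using this
    have hjs : s ≡ j [ZMOD p] := by
      show s % p = j % p
      rw [hsm, hj0]
      have : j % p = (r - i) % p := hjr
      rw [this]
    have hd : p ∣ j - s := Int.ModEq.dvd hjs
    obtain ⟨k, hk⟩ := hd
    have hk0 : 0 ≤ k := by
      by_contra hneg
      have hk1 : k ≤ -1 := by omega
      have : p * k ≤ p * (-1) := by
        exact mul_le_mul_of_nonneg_left hk1 (le_of_lt hp)
      omega
    have : 0 ≤ p * k := mul_nonneg (le_of_lt hp) hk0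
    exact ⟨⟨by omega, by omega, ⟨k, hk⟩⟩, hji⟩

theorem nodup_progB (n p i r : Int) (hp : 0 < p) : (progB n p i r).Nodup := by
  unfold progB
  apply List.Nodup.filter
  rw [PySem.List.pyRange_of_pos _ _ hp]
  apply List.Nodup.map _ List.nodup_range
  intro a b hab
  simp only at hab
  have : p * (a : Int) = p * (b : Int) := by omega
  have := mul_left_cancel₀ (by omega : (p:Int) ≠ 0) this
  exact_mod_cast this

theorem mem_rowA (n p i j : Int) (Q : List Int) :
    j ∈ rowA n p i Q ↔ 1 ≤ j ∧ j ≤ n ∧ j ≠ i ∧ PySem.Int.mod (i+j) p ∈ Q := by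
  unfold rowA
  simp only [List.mem_filter, PySem.List.mem_pyRange_one, Bool.and_eq_true, bne_iff_ne,
    List.contains_iff_mem]
  constructor
  · rintro ⟨⟨ha, hb⟩, hm, hne⟩
    exact ⟨by omega, by omega, Ne.symm hne, hm⟩
  · rintro ⟨ha, hb, hne, hm⟩
    exact ⟨⟨by omega, by omega⟩, hm, Ne.symm hne⟩

theorem rowA_pairwise (n p i : Int) (Q : List Int) :
    (rowA n p i Q).Pairwise (· < ·) := by
  exact (PySem.List.pairwise_lt_pyRange_one 1 (n+1)).filter _

theorem row_eq (n p i : Int) :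
    PySem.List.sorted ((QRList p).flatMap (progB n p i)) (fun x => x) = rowA n p i (QRList p) := by
  by_cases hp : p ≤ 2
  · rw [qrlist_nil p hp]
    show PySem.List.sorted [] (fun x => x) = _
    unfold rowA
    simp only [List.contains_nil, Bool.false_and, List.filter_false]
    rfl
  · have hp3 : 0 < p := by omega
    have hA : (rowA n p i (QRList p)).Pairwise (· < ·) := rowA_pairwise n p i _
    have hAnd : (rowA n p i (QRList p)).Nodup := hA.imp ne_of_lt
    have hFnd : ((QRList p).flatMap (progB n p i)).Nodup := by
      rw [List.nodup_flatMap]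
      refine ⟨fun r _ => nodup_progB n p i r hp3, ?_⟩
      refine (qrlist_nodup p).imp_of_mem ?_
      intro r r' hr hr' hne j hj1 hj2
      obtain ⟨hb0, hb1⟩ := qrlist_bounds p hp3 r hr
      obtain ⟨hb0', hb1'⟩ := qrlist_bounds p hp3 r' hr'
      obtain ⟨_, _, _, he⟩ := (mem_progB n p i r j hp3 hb0 hb1).mp hj1
      obtain ⟨_, _, _, he'⟩ := (mem_progB n p i r' j hp3 hb0' hb1').mp hj2
      exact hne (he ▸ he' ▸ rfl)
    apply PySem.List.sorted_eq_of_perm_of_pairwise_lt _ _ _ ?_ hA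
    rw [List.perm_ext_iff_of_nodup hAnd hFnd]
    intro j
    rw [mem_rowA, List.mem_flatMap]
    constructor
    · rintro ⟨h1, h2, hne, hmem⟩
      obtain ⟨hb0, hb1⟩ := qrlist_bounds p hp3 _ hmem
      exact ⟨_, hmem, (mem_progB n p i _ j hp3 hb0 hb1).mpr ⟨h1, h2, hne, rfl⟩⟩
    · rintro ⟨r, hr, hj⟩
      obtain ⟨hb0, hb1⟩ := qrlist_bounds p hp3 r hr
      obtain ⟨h1, h2, hne, he⟩ := (mem_progB n p i r j hp3 hb0 hb1).mp hj
      exact ⟨h1, h2, hne, he ▸ hr⟩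

def mapDict (rng : List Int) (v : Int → List Int) : PySem.Dict Int (List Int) :=
  PySem.Dict.mk (rng.map (fun k => (k, v k)))

theorem keys_mapDict (rng : List Int) (v : Int → List Int) : (mapDict rng v).keys = rng := by
  show (rng.map (fun k => (k, v k))).map Prod.fst = rng
  simp [Function.comp_def]

theorem contains_mapDict (rng : List Int) (v : Int → List Int) {i : Int} (hi : i ∈ rng) :
    (mapDict rng v).contains i = true := by
  rw [PySem.Dict.contains_iff_mem_keys, keys_mapDict]
  exact hi

theorem getD_mapDict (rng : List Int) (v : Int → List Int) {i : Int} (hnd : rng.Nodup)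
    (hi : i ∈ rng) (d0 : List Int) : (mapDict rng v).getD i d0 = v i := by
  apply PySem.Dict.getD_of_mem_items
  · exact List.mem_map.mpr ⟨i, hi, rfl⟩
  · rw [keys_mapDict]; exact hnd

theorem modify_mapDict (rng : List Int) (v : Int → List Int) {i : Int} (hnd : rng.Nodup)
    (hi : i ∈ rng) (g : List Int → List Int) :
    (mapDict rng v).modify i [] g = mapDict rng (fun k => if k = i then g (v k) else v k) := by
  show (mapDict rng v).insert i (g ((mapDict rng v).getD i [])) = _
  rw [getD_mapDict rng v hnd hi]
  apply PySem.Dict.ext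
  rw [PySem.Dict.items_insert_of_contains _ _ (contains_mapDict rng v hi)]
  show (rng.map (fun k => (k, v k))).map _ = rng.map _
  rw [List.map_map]
  apply List.map_congr_left
  intro k _
  by_cases hk : k = i <;> simp [hk]

theorem inner_fold (rng : List Int) {i : Int} (hnd : rng.Nodup) (hi : i ∈ rng)
    (js : List Int) (v : Int → List Int) :
    js.foldl (fun d j => d.modify i [] (· ++ [j])) (mapDict rng v)
      = mapDict rng (fun k => if k = i then v k ++ js else v k) := by
  induction js generalizing v with
  | nil =>
    simp only [List.foldl_nil]
    congr 1
    funext k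
    by_cases hk : k = i <;> simp [hk]
  | cons j js ih =>
    simp only [List.foldl_cons]
    rw [modify_mapDict rng v hnd hi, ih]
    congr 1
    funext k
    by_cases hk : k = i <;> simp [hk]

theorem outer_fold (rng : List Int) (row : Int → List Int) :
    ∀ (os : List Int), rng.Nodup → (∀ x ∈ os, x ∈ rng) → os.Nodup → ∀ (v : Int → List Int),
    os.foldl (fun d i => (row i).foldl (fun d j => d.modify i [] (· ++ [j])) d) (mapDict rng v)
      = mapDict rng (fun k => if k ∈ os then v k ++ row k else v k) := by
  intro os
  induction os with
  | nil =>
    intro _ _ _ v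
    simp
  | cons o os ih =>
    intro hnd hos hosnd v
    have honotin : o ∉ os := (List.nodup_cons.mp hosnd).1
    simp only [List.foldl_cons]
    rw [inner_fold rng hnd (hos o List.mem_cons_self)]
    rw [ih hnd (fun x hx => hos x (List.mem_cons_of_mem _ hx)) (List.nodup_cons.mp hosnd).2]
    congr 1
    funext k
    by_cases hk : k = o
    · subst hk
      simp [honotin]
    · by_cases hk2 : k ∈ os <;> simp [hk, hk2]

theorem altB_items (n p : Int) :
    QRAdjList_alt n p =
      (PySem.List.pyRange 1 (n+1) 1).map
        (fun i => (i, PySem.List.sorted ((QRList p).flatMap (progB n p i)) (fun x => x))) := by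
  simp only [QRAdjList_alt]
  rw [← qrset_eq]
  rw [PySem.Dict.items_foldl_insert_fresh _ (fun a => a)
    (fun i => PySem.List.sorted ((QRList p).foldl (fun acc r =>
        let start := if PySem.Int.mod (r + PySem.Int.mod (-i) p) p == 0 then p
                     else PySem.Int.mod (r + PySem.Int.mod (-i) p) p
        acc ++ (PySem.List.pyRange start (n+1) p).filter (fun j => j != i)) []) (fun x => x))
    PySem.Dict.empty (by intro a _; rfl) (by simpa using PySem.List.nodup_pyRange_one 1 (n+1))]
  show List.map _ _ = _
  apply List.map_congr_left
  intro i _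
  by_cases hp : p ≤ 2
  · rw [qrlist_nil p hp]
    rfl
  · have hp0 : 0 < p := by omega
    have hbody : (fun (acc : List Int) r =>
          let start := if PySem.Int.mod (r + PySem.Int.mod (-i) p) p == 0 then p
                       else PySem.Int.mod (r + PySem.Int.mod (-i) p) p
          acc ++ (PySem.List.pyRange start (n+1) p).filter (fun j => j != i))
        = fun acc r => acc ++ progB n p i r := by
      funext acc r
      have hmod : PySem.Int.mod (r + PySem.Int.mod (-i) p) p = PySem.Int.mod (r - i) p := by
        simp only [PySem.Int.mod_eq_emod_of_pos hp0]
        rw [sub_eq_add_neg, Int.add_emod r ((-i) % p) p, Int.emod_emod_of_dvd _ dvd_rfl,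
          ← Int.add_emod]
      have h0 : 0 ≤ PySem.Int.mod (r - i) p := PySem.Int.mod_nonneg _ hp0
      simp only [hmod, progB]
      have hstart : (if PySem.Int.mod (r - i) p == 0 then p else PySem.Int.mod (r - i) p)
          = (if PySem.Int.mod (r - i) p ≥ 1 then PySem.Int.mod (r - i) p
             else PySem.Int.mod (r - i) p + p) := by
        rcases eq_or_ne (PySem.Int.mod (r - i) p) 0 with h | h
        · rw [h]; norm_num
        · have : PySem.Int.mod (r - i) p ≥ 1 := by omega
          simp [h, this]
      rw [hstart]
    rw [hbody, PySem.List.foldl_append_eq_flatMap]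
    rfl

theorem portA_items (n p : Int) :
    QRAdjList n p =
      (PySem.List.pyRange 1 (n+1) 1).map (fun i => (i, rowA n p i (QRList p))) := by
  simp only [QRAdjList]
  have h0 : (PySem.List.pyRange 1 (n+1) 1).foldl (fun d i => d.insert i []) PySem.Dict.empty
      = mapDict (PySem.List.pyRange 1 (n+1) 1) (fun _ => []) := by
    apply PySem.Dict.ext
    rw [PySem.Dict.items_foldl_insert_fresh _ (fun a => a) (fun _ => []) PySem.Dict.empty
      (by intro a _; rfl) (by simpa using PySem.List.nodup_pyRange_one 1 (n+1))]
    rfl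
  rw [h0]
  simp only [PySem.List.foldl_if_eq_foldl_filter]
  refine Eq.trans (congrArg PySem.Dict.items (outer_fold (PySem.List.pyRange 1 (n+1) 1)
    (fun i => rowA n p i (QRList p)) (PySem.List.pyRange 1 (n+1) 1)
    (PySem.List.nodup_pyRange_one 1 (n+1)) (fun x hx => hx) (PySem.List.nodup_pyRange_one 1 (n+1))
    (fun _ => []))) ?_
  show List.map _ _ = _
  apply List.map_congr_left
  intro k hk
  simp [hk]

-- ===== VERDICT (by name: the statement is the Claim_ definition above) =====
theorem QRAdjList_spec : Claim_equal_QRAdjList := by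
  intro n p _ _
  unfold Spec_QRAdjList
  rw [portA_items, altB_items]
  exact (List.map_congr_left (fun i _ => by rw [row_eq])).symm
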